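-- pv_equiv track=rewrite | github.com/LDYWINNER/PycharmProjects | assign5/Assign5Answer3.py | remove_number
-- ===== SOURCE A (Python) =====
-- def remove_number(x, nums):
--     if x not in nums:
--         return nums
--     elif nums[0] == x and nums[-1] == x:
--         return nums[1:-1]
--     elif nums[0] != x and nums[-1] == x:
--         return [nums[0]] + remove_number(x, nums[1:-1])
--     elif nums[0] == x and nums[-1] != x:
--         return remove_number(x, nums[1:-1]) + [nums[-1]]
--     elif nums[0] != x and nums[-1] != x:
--         return [nums[0]] + remove_number(x, nums[1:-1]) + [nums[-1]]
-- ===== SOURCE B (Python) =====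
-- def remove_number(x, nums):
--     return [n for n in nums if n != x]
-- ===== Notes on version B (the rewrite author's own statement) =====
-- stated objective: simpler
-- what changed: Replaced the double-ended recursive peeling (membership test plus two-end slicing at every level) with a single linear filter pass that drops every occurrence of x.
-- intended difference: On inputs where the symmetric inward peel first meets x at BOTH ends while another x lies strictly between them, A drops that pair but returns the middle verbatim, keeping interior occurrences of x (e.g. A(1,[1,1,1])=[1]); B removes every occurrence of x, which is the evident intent of a function named remove_number. — e.g. on remove_number(1, [1, 1, 1]): A returns [1], B returns []
import Mathlib
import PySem

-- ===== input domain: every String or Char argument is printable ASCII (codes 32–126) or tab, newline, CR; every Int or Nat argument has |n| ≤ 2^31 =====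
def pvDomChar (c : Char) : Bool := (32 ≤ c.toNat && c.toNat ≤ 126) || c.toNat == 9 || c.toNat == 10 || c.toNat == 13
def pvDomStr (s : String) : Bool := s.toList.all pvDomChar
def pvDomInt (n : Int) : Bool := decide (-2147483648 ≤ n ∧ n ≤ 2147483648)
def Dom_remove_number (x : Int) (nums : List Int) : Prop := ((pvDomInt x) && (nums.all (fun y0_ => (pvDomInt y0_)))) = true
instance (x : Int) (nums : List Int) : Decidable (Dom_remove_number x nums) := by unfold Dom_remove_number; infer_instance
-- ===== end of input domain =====

-- B replaces A's double-ended recursive peeling by one linear filter pass removing every x;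
-- on inputs where A's first both-ends-x step leaves interior x's behind, B removes them too (D_ below).


-- length fact the port's termination proof cites
theorem pv_tail_dropLast_lt {α : Type} (xs : List α) (h : xs ≠ []) :
    xs.tail.dropLast.length < xs.length := by
  cases xs with
  | nil => exact absurd rfl h
  | cons a t =>
    simp only [List.tail_cons, List.length_dropLast, List.length_cons]
    omega

-- xs[1:-1] (clamped drop/take) equals tail.dropLast; cited by termination and the proofs
theorem pv_slice_one_neg_one {α : Type} (xs : List α) :
    PySem.List.slice xs (some 1) (some (-1)) = xs.tail.dropLast := by
  cases xs with
  | nil => rfl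
  | cons a t =>
    simp [PySem.List.slice, List.dropLast_eq_take]

-- ===== PORT A =====
def remove_number (x : Int) (nums : List Int) : List Int :=
  if hmem : ¬ (x ∈ nums) then nums          -- if x not in nums: return nums
  else
    match PySem.List.pyGet? nums 0, PySem.List.pyGet? nums (-1) with
    | some a, some b =>
      if a = x ∧ b = x then
        PySem.List.slice nums (some 1) (some (-1))
      else if a ≠ x ∧ b = x then
        a :: remove_number x (PySem.List.slice nums (some 1) (some (-1)))
      else if a = x ∧ b ≠ x then
        remove_number x (PySem.List.slice nums (some 1) (some (-1))) ++ [b]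
      else  -- final elif's guard a ≠ x ∧ b ≠ x is exhaustive here (Python's implicit None is unreachable)
        a :: remove_number x (PySem.List.slice nums (some 1) (some (-1))) ++ [b]
    | _, _ => nums   -- unreachable: x ∈ nums ⇒ nums ≠ [] ⇒ nums[0], nums[-1] exist
termination_by nums.length
decreasing_by
  all_goals
    simp only [pv_slice_one_neg_one]
    exact pv_tail_dropLast_lt nums (List.ne_nil_of_mem (not_not.mp hmem))

-- ===== PORT B =====
def remove_number_alt (x : Int) (nums : List Int) : List Int :=
  nums.filter (fun n => n != x)

-- ===== PRECONDITION & SPEC =====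
-- On inputs where the symmetric inward peel first meets x at BOTH ends while another x lies strictly
-- between them, A drops that pair but returns the middle verbatim (keeping interior x's, e.g.
-- A(1,[1,1,1])=[1]); B removes every occurrence of x, the evident intent of remove_number.
def D_remove_number (x : Int) (nums : List Int) : Prop :=
  ∃ k < nums.length, 2 * k < nums.length ∧
    nums[k]? = some x ∧ nums[nums.length - 1 - k]? = some x ∧
    (∀ j < k, ¬(nums[j]? = some x ∧ nums[nums.length - 1 - j]? = some x)) ∧
    ∃ j < nums.length, k < j ∧ j < nums.length - 1 - k ∧ nums[j]? = some x

instance (x : Int) (nums : List Int) : Decidable (D_remove_number x nums) := by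
  unfold D_remove_number; infer_instance

def Spec_remove_number (x : Int) (nums : List Int) (out : List Int) : Prop :=
  ¬ D_remove_number x nums → out = remove_number_alt x nums
instance (x : Int) (nums : List Int) (out : List Int) : Decidable (Spec_remove_number x nums out) := by
  unfold Spec_remove_number; infer_instance

def pvDiffWitness_remove_number : Int × List Int := (1, [1, 1, 1])
def pvDiffWitnessOut_remove_number : (List Int) × (List Int) := ([1], [])

-- ===== CLAIM (what is proved, stated in full; the proofs are below) =====
def Claim_unchanged_remove_number : Prop := ∀ (x : Int) (nums : List Int), Dom_remove_number x nums → Spec_remove_number x nums (remove_number x nums)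
def Claim_changed_remove_number : Prop := Dom_remove_number (pvDiffWitness_remove_number.1) (pvDiffWitness_remove_number.2) ∧ D_remove_number (pvDiffWitness_remove_number.1) (pvDiffWitness_remove_number.2) ∧ remove_number (pvDiffWitness_remove_number.1) (pvDiffWitness_remove_number.2) = pvDiffWitnessOut_remove_number.1 ∧ remove_number_alt (pvDiffWitness_remove_number.1) (pvDiffWitness_remove_number.2) = pvDiffWitnessOut_remove_number.2 ∧ pvDiffWitnessOut_remove_number.1 ≠ pvDiffWitnessOut_remove_number.2
def Claim_exact_remove_number : Prop := ∀ (x : Int) (nums : List Int), Dom_remove_number x nums → D_remove_number x nums → remove_number x nums ≠ remove_number_alt x nums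

-- ===== LEMMAS AND PROOFS =====

theorem pv_get_mid (a b x : Int) (l : List Int) (j : Nat) (hj : j < l.length) :
    (a :: l ++ [b])[j+1]? = l[j]? := by
  simp [List.getElem?_append_left, hj]

theorem pv_get_last (a b : Int) (l : List Int) :
    (a :: l ++ [b])[l.length+1]? = some b := by simp

theorem pv_pair_shift (x a b : Int) (l : List Int) (k : Nat) (hk : k < l.length) :
    ((a :: l ++ [b])[k+1]? = some x ∧ (a :: l ++ [b])[(a :: l ++ [b]).length - 1 - (k+1)]? = some x)
      ↔ (l[k]? = some x ∧ l[l.length - 1 - k]? = some x) := by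
  have h2 : (a :: l ++ [b]).length - 1 - (k+1) = (l.length - 1 - k) + 1 := by simp; omega
  rw [pv_get_mid a b x l k hk, h2, pv_get_mid a b x l _ (by omega)]

theorem pv_pair_zero (x a b : Int) (l : List Int) :
    ((a :: l ++ [b])[0]? = some x ∧ (a :: l ++ [b])[(a :: l ++ [b]).length - 1 - 0]? = some x)
      ↔ (a = x ∧ b = x) := by
  have h2 : (a :: l ++ [b]).length - 1 - 0 = l.length + 1 := by simp
  rw [h2, pv_get_last]
  simp

theorem pv_D_both (x a b : Int) (l : List Int) (ha : a = x) (hb : b = x) :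
    D_remove_number x (a :: l ++ [b]) ↔ x ∈ l := by
  constructor
  · rintro ⟨k, hk, h2k, hpk, hpk', hmin, j, hj, hkj, hjlt, hjx⟩
    have hk0 : k = 0 := by
      by_contra h
      exact hmin 0 (by omega) ((pv_pair_zero x a b l).mpr ⟨ha, hb⟩)
    subst hk0
    obtain ⟨j', rfl⟩ : ∃ j', j = j' + 1 := ⟨j - 1, by omega⟩
    have hj'l : j' < l.length := by simp at hjlt; omega
    rw [pv_get_mid a b x l j' hj'l] at hjx
    exact List.mem_of_getElem? hjx
  · intro hx
    obtain ⟨j', hget⟩ := List.mem_iff_getElem?.mp hx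
    have hj'l : j' < l.length := (List.getElem?_eq_some_iff.mp hget).1
    refine ⟨0, by simp, by simp, ((pv_pair_zero x a b l).mpr ⟨ha, hb⟩).1,
      ((pv_pair_zero x a b l).mpr ⟨ha, hb⟩).2, by omega, j' + 1, by simp; omega, by omega,
      by simp; omega, by rw [pv_get_mid a b x l j' hj'l]; exact hget⟩

theorem pv_D_shift (x a b : Int) (l : List Int) (hne : ¬(a = x ∧ b = x)) :
    D_remove_number x (a :: l ++ [b]) ↔ D_remove_number x l := by
  constructor
  · rintro ⟨k, hk, h2k, hpk, hpk', hmin, j, hj, hkj, hjlt, hjx⟩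
    have hk0 : k ≠ 0 := by
      rintro rfl
      exact hne ((pv_pair_zero x a b l).mp ⟨hpk, hpk'⟩)
    obtain ⟨k', rfl⟩ : ∃ k', k = k' + 1 := ⟨k - 1, by omega⟩
    have hk'l : k' < l.length := by simp at h2k; omega
    obtain ⟨j', rfl⟩ : ∃ j', j = j' + 1 := ⟨j - 1, by omega⟩
    have hj'l : j' < l.length := by simp at hjlt; omega
    refine ⟨k', hk'l, by simp at h2k; omega, ((pv_pair_shift x a b l k' hk'l).mp ⟨hpk, hpk'⟩).1,
      ((pv_pair_shift x a b l k' hk'l).mp ⟨hpk, hpk'⟩).2, ?_, j', hj'l, by omega, ?_, ?_⟩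
    · intro j'' hj''
      have hj''l : j'' < l.length := by omega
      intro hpair
      exact hmin (j'' + 1) (by omega) ((pv_pair_shift x a b l j'' hj''l).mpr hpair)
    · simp at hjlt ⊢; omega
    · rw [← pv_get_mid a b x l j' hj'l]; exact hjx
  · rintro ⟨k, hk, h2k, hpk, hpk', hmin, j, hj, hkj, hjlt, hjx⟩
    refine ⟨k + 1, by simp; omega, by simp; omega,
      ((pv_pair_shift x a b l k hk).mpr ⟨hpk, hpk'⟩).1,
      ((pv_pair_shift x a b l k hk).mpr ⟨hpk, hpk'⟩).2, ?_, j + 1, by simp; omega, by omega,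
      by simp; omega, by rw [pv_get_mid a b x l j hj]; exact hjx⟩
    intro j' hj'
    match j' with
    | 0 => intro hpair; exact hne ((pv_pair_zero x a b l).mp hpair)
    | j'' + 1 =>
      intro hpair
      exact hmin j'' (by omega) ((pv_pair_shift x a b l j'' (by omega)).mp hpair)

theorem pv_rn_not_mem (x : Int) (nums : List Int) (h : x ∉ nums) :
    remove_number x nums = nums := by
  rw [remove_number.eq_def, dif_pos h]

theorem pv_rn_single (x a : Int) (h : x ∈ [a]) :
    remove_number x [a] = [] := by
  obtain rfl : x = a := by simpa using h
  rw [remove_number.eq_def, dif_neg (not_not.mpr h)]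
  have e0 : PySem.List.pyGet? [x] 0 = some x := rfl
  have e1 : PySem.List.pyGet? [x] (-1) = some x := rfl
  rw [e0, e1]
  simp [pv_slice_one_neg_one]

theorem pv_rn_cons (x a b : Int) (l : List Int) (hmem : x ∈ a :: l ++ [b]) :
    remove_number x (a :: l ++ [b]) =
      if a = x ∧ b = x then l
      else if a ≠ x ∧ b = x then a :: remove_number x l
      else if a = x ∧ b ≠ x then remove_number x l ++ [b]
      else a :: remove_number x l ++ [b] := by
  have e0 : PySem.List.pyGet? (a :: l ++ [b]) 0 = some a := PySem.List.pyGet?_zero_cons a (l ++ [b])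
  have e1 : PySem.List.pyGet? (a :: l ++ [b]) (-1) = some b := by
    rw [show a :: l ++ [b] = (a :: l) ++ [b] by simp]
    exact PySem.List.pyGet?_neg_one_append_singleton (a :: l) b
  have es : PySem.List.slice (a :: l ++ [b]) (some 1) (some (-1)) = l := by
    rw [pv_slice_one_neg_one]; simp
  rw [remove_number.eq_def, dif_neg (not_not.mpr hmem)]
  rw [es, e0, e1]

theorem A_eq_filter (x : Int) : ∀ (n : Nat) (nums : List Int), nums.length = n →
    ¬ D_remove_number x nums → remove_number x nums = nums.filter (fun v => v != x) := by
  intro n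
  induction n using Nat.strong_induction_on with
  | _ n ih =>
    intro nums hlen hD
    by_cases hmem : x ∈ nums
    · cases nums with
      | nil => simp at hmem
      | cons a t =>
        rcases List.eq_nil_or_concat' t with rfl | ⟨l, b, rfl⟩
        · rw [pv_rn_single x a hmem]
          obtain rfl : x = a := by simpa using hmem
          simp
        · rw [← List.cons_append] at hD hmem hlen ⊢
          rw [pv_rn_cons x a b l hmem]
          by_cases hab : a = x ∧ b = x
          · rw [if_pos hab]
            have hxl : x ∉ l := fun hx => hD ((pv_D_both x a b l hab.1 hab.2).mpr hx)
            have hfl : l.filter (fun v => v != x) = l := by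
              rw [List.filter_eq_self]
              intro v hv
              simp only [bne_iff_ne, ne_eq]
              rintro rfl; exact hxl hv
            obtain ⟨rfl, rfl⟩ := hab
            simp [List.filter_append, hfl]
          · have hD' : ¬ D_remove_number x l := fun hd => hD ((pv_D_shift x a b l hab).mpr hd)
            have hlen' : l.length < n := by
              simp only [List.length_cons, List.length_append] at hlen
              omega
            have ihl := ih l.length hlen' l rfl hD'
            rw [if_neg hab]
            by_cases hbx : b = x
            · have hax : a ≠ x := fun h => hab ⟨h, hbx⟩
              rw [if_pos ⟨hax, hbx⟩, ihl]
              subst hbx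
              simp [List.filter_append, hax]
            · by_cases hax : a = x
              · rw [if_neg (by tauto), if_pos ⟨hax, hbx⟩, ihl]
                subst hax
                simp [List.filter_append, hbx]
              · rw [if_neg (by tauto), if_neg (by tauto), ihl]
                simp [List.filter_append, hax, hbx]
    · rw [pv_rn_not_mem x nums hmem]
      refine (List.filter_eq_self.mpr ?_).symm
      intro v hv
      simp only [bne_iff_ne, ne_eq]
      rintro rfl; exact hmem hv

theorem mem_A_of_D (x : Int) : ∀ (n : Nat) (nums : List Int), nums.length = n →
    D_remove_number x nums → x ∈ remove_number x nums := by
  intro n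
  induction n using Nat.strong_induction_on with
  | _ n ih =>
    intro nums hlen hD
    have hmem : x ∈ nums := by
      obtain ⟨k, hk, _, hpk, _⟩ := hD
      exact List.mem_of_getElem? hpk
    cases nums with
    | nil => simp at hmem
    | cons a t =>
      rcases List.eq_nil_or_concat' t with rfl | ⟨l, b, rfl⟩
      · -- D on a singleton is impossible: there is no strictly interior index
        exfalso
        obtain ⟨k, hk, h2k, _, _, _, j, hj, hkj, hjlt, _⟩ := hD
        simp only [List.length_singleton] at hk hj hjlt
        omega
      · rw [← List.cons_append] at hD hmem hlen ⊢
        rw [pv_rn_cons x a b l hmem]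
        by_cases hab : a = x ∧ b = x
        · rw [if_pos hab]
          exact (pv_D_both x a b l hab.1 hab.2).mp hD
        · have hDl : D_remove_number x l := (pv_D_shift x a b l hab).mp hD
          have hlen' : l.length < n := by
            simp only [List.length_cons, List.length_append] at hlen
            omega
          have ihl := ih l.length hlen' l rfl hDl
          rw [if_neg hab]
          by_cases hbx : b = x
          · rw [if_pos ⟨fun h => hab ⟨h, hbx⟩, hbx⟩]
            exact List.mem_cons_of_mem a ihl
          · by_cases hax : a = x
            · rw [if_neg (by tauto), if_pos ⟨hax, hbx⟩]
              exact List.mem_append_left _ ihl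
            · rw [if_neg (by tauto), if_neg (by tauto)]
              exact List.mem_cons_of_mem a (List.mem_append_left _ ihl)

-- ===== VERDICT =====
theorem remove_number_spec : Claim_unchanged_remove_number := by
  intro x nums _ hD
  exact A_eq_filter x nums.length nums rfl hD

theorem remove_number_changed : Claim_changed_remove_number := by
  unfold Claim_changed_remove_number
  refine ⟨by decide, by decide, ?_, by decide, by decide⟩
  rw [remove_number.eq_def]
  decide

theorem remove_number_tight : Claim_exact_remove_number := by
  intro x nums _ hD heq
  have hx := mem_A_of_D x nums.length nums rfl hD
  rw [heq] at hx
  simp [remove_number_alt] at hx
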